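-- pv_equiv track=rewrite | github.com/JiayinCao/SORT | sortblend/material/osl_parser.py | findShaderKeyword
-- ===== SOURCE A (Python) =====
-- def findShaderKeyword(source):
--     # separate parameters before analysing each parameter for simplicity
--     i = -1
--     while True:
--         # find keyword 'shader'
--         i = source.find( 'shader' , i + 1 )
--         # this is the end of the shader, it is most likely a broken one
--         if i + 6 == len(source):
--             return -1
--         # there is no such a keyword at all
--         if i == -1:
--             return -1
--         # check if the shader keyword is wrapped by white space
--         if ( i == 0 or source[i-1].isspace() ) and source[i+6].isspace():
--             break
--     return i
-- ===== SOURCE B (Python) =====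
-- def findShaderKeyword(source):
--     # Single explicit tokenizer pass: walk whitespace-delimited tokens and
--     # return the start of the first token equal to 'shader' that is
--     # terminated by a whitespace character (not by end-of-string).
--     n = len(source)
--     pos = 0
--     while pos < n:
--         if source[pos].isspace():
--             pos += 1
--             continue
--         start = pos
--         while pos < n and not source[pos].isspace():
--             pos += 1
--         if source[start:pos] == 'shader' and pos < n:
--             return start
--     return -1
-- ===== Notes on version B (the rewrite author's own statement) =====
-- stated objective: alternative
-- what changed: Replaced A's repeated str.find('shader', i+1) calls with neighbour checks by a single explicit whitespace tokenizer: skip whitespace runs, scan each maximal non-whitespace token, and return the start of the first token equal to 'shader' that is terminated by a whitespace character.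
import Mathlib
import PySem

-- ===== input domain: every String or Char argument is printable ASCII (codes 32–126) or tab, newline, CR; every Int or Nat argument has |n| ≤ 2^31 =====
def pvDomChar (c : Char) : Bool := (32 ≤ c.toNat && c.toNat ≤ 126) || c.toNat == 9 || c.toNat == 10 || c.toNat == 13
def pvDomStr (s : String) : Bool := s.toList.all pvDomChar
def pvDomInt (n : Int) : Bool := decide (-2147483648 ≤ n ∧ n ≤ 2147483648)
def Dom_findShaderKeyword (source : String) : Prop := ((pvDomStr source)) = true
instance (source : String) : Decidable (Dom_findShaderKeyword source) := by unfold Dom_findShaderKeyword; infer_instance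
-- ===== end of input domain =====

-- B replaces A's repeated str.find-and-check-neighbours loop by a single explicit
-- whitespace tokenizer pass (objective: alternative decomposition, same cost).

-- ===== PORT A =====

-- the literal 'shader'
def shaderChars : List Char := ['s', 'h', 'a', 'd', 'e', 'r']

-- source[x].isspace() where Python's index is always in range on the executed path
def isspaceO (o : Option Char) : Bool :=
  match o with
  | some c => PySem.Chars.isspace c
  | none => false

-- A's `while True` loop; fuel = len+1 is a totality guard only (never hit from the entry)
def loopA (cs : List Char) (fuel : Nat) (i : Int) : Int :=
  match fuel with
  | 0 => -1
  | fuel + 1 =>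
    let j := PySem.Chars.findFrom cs shaderChars (i + 1) none
    if j + 6 = (cs.length : Int) then -1
    else if j = -1 then -1
    else if (decide (j = 0) || isspaceO (PySem.List.pyGet? cs (j - 1))) &&
            isspaceO (PySem.List.pyGet? cs (j + 6)) then j
    else loopA cs fuel j

def findShaderKeyword (source : String) : Int :=
  loopA source.toList (source.toList.length + 1) (-1)

-- ===== PORT B =====

-- inner `while pos < n and not source[pos].isspace(): pos += 1`
def skipTok (cs : List Char) (pos : Nat) : Nat :=
  if h : pos < cs.length then
    if PySem.Chars.isspace cs[pos] then pos else skipTok cs (pos + 1)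
  else pos
termination_by cs.length - pos
decreasing_by omega

-- needed by scanB's termination proof
theorem skipTok_ge (cs : List Char) (pos : Nat) : pos ≤ skipTok cs pos := by
  fun_induction skipTok cs pos <;> omega

theorem skipTok_gt (cs : List Char) (pos : Nat) (h1 : pos < cs.length)
    (h2 : ¬ PySem.Chars.isspace cs[pos] = true) : pos < skipTok cs pos := by
  rw [skipTok, dif_pos h1, if_neg h2]
  have := skipTok_ge cs (pos + 1)
  omega

-- outer tokenizer loop of B
def scanB (cs : List Char) (pos : Nat) : Int :=
  if h : pos < cs.length then
    if PySem.Chars.isspace cs[pos] then scanB cs (pos + 1)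
    else
      let e := skipTok cs pos
      if PySem.List.slice cs (some (pos : Int)) (some (e : Int)) = shaderChars ∧ e < cs.length
      then (pos : Int)
      else scanB cs e
  else -1
termination_by cs.length - pos
decreasing_by
  · omega
  · have := skipTok_gt cs pos h (by assumption)
    omega

def findShaderKeyword_alt (source : String) : Int :=
  scanB source.toList 0

-- ===== PRECONDITION & SPEC =====
def Spec_findShaderKeyword (source : String) (out : Int) : Prop := out = findShaderKeyword_alt source
instance (source : String) (out : Int) : Decidable (Spec_findShaderKeyword source out) := by unfold Spec_findShaderKeyword; infer_instance

-- ===== CLAIM (what is proved, stated in full; the proofs are below) =====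
def Claim_equal_findShaderKeyword : Prop := ∀ (source : String), Dom_findShaderKeyword source → Spec_findShaderKeyword source (findShaderKeyword source)

-- ===== LEMMAS AND PROOFS =====

-- `k` is the position of a whitespace-delimited 'shader' keyword (the common spec)
def goodB (cs : List Char) (k : Nat) : Bool :=
  shaderChars.isPrefixOf (cs.drop k) &&
  (k == 0 || isspaceO cs[k-1]?) &&
  decide (k + 6 < cs.length) &&
  isspaceO cs[k+6]?

-- first good position ≥ k, or -1
def fgf (cs : List Char) (k : Nat) : Int :=
  if h : k < cs.length then (if goodB cs k then (k : Int) else fgf cs (k + 1))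
  else -1
termination_by cs.length - k
decreasing_by omega

theorem goodB_lt (cs : List Char) (k : Nat) (h : goodB cs k = true) : k < cs.length := by
  simp only [goodB, Bool.and_eq_true, decide_eq_true_eq] at h
  omega

theorem goodB_prefix (cs : List Char) (k : Nat) (h : goodB cs k = true) :
    shaderChars <+: cs.drop k := by
  simp only [goodB, Bool.and_eq_true, List.isPrefixOf_iff_prefix] at h
  exact h.1.1.1

theorem fgf_stop (cs : List Char) (k : Nat) (h : cs.length ≤ k) : fgf cs k = -1 := by
  rw [fgf, dif_neg (by omega)]

theorem fgf_good (cs : List Char) (k : Nat) (h : goodB cs k = true) : fgf cs k = k := by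
  rw [fgf, dif_pos (goodB_lt cs k h), if_pos h]

theorem fgf_skip (cs : List Char) (k : Nat) (h : goodB cs k = false) :
    fgf cs k = fgf cs (k + 1) := by
  by_cases hk : k < cs.length
  · rw [fgf, dif_pos hk, if_neg (by simp [h])]
  · rw [fgf_stop cs k (by omega), fgf_stop cs (k+1) (by omega)]

theorem fgf_congr (cs : List Char) (k j : Nat) (hkj : k ≤ j)
    (h : ∀ m, k ≤ m → m < j → goodB cs m = false) : fgf cs k = fgf cs j := by
  have aux : ∀ d k, (∀ m, k ≤ m → m < k + d → goodB cs m = false) → fgf cs k = fgf cs (k + d) := by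
    intro d
    induction d with
    | zero => intro k _; rfl
    | succ d ih =>
      intro k hm
      rw [fgf_skip cs k (hm k le_rfl (by omega))]
      have := ih (k + 1) (fun m h1 h2 => hm m (by omega) (by omega))
      rw [this]; ring_nf
  have := aux (j - k) k (fun m h1 h2 => h m h1 (by omega))
  rwa [Nat.add_sub_cancel' hkj] at this

theorem fgf_none (cs : List Char) (k : Nat) (h : ∀ m, k ≤ m → goodB cs m = false) :
    fgf cs k = -1 := by
  by_cases hk : k ≤ cs.length
  · rw [fgf_congr cs k cs.length hk (fun m h1 _ => h m h1), fgf_stop cs cs.length le_rfl]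
  · exact fgf_stop cs k (by omega)

-- the chars of 'shader' are not whitespace
theorem shader_not_space : ∀ c ∈ shaderChars, PySem.Chars.isspace c = false := by
  intro c hc
  fin_cases hc <;> decide

-- a prefix of cs.drop m with m ≥ k is an infix of cs.drop k
theorem prefix_drop_infix (cs sub : List Char) (k m : Nat) (hkm : k ≤ m)
    (h : sub <+: cs.drop m) : sub <:+: cs.drop k := by
  have : cs.drop m = (cs.drop k).drop (m - k) := by
    rw [List.drop_drop]; congr 1; omega
  rw [this] at h
  exact h.isInfix.trans (List.drop_suffix _ _).isInfix

-- characterisation of skipTok's result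
theorem skipTok_spec (cs : List Char) (pos : Nat) :
    (∀ m, pos ≤ m → m < skipTok cs pos → m < cs.length ∧ isspaceO cs[m]? = false) ∧
    (cs.length ≤ skipTok cs pos ∨ isspaceO cs[skipTok cs pos]? = true) := by
  fun_induction skipTok cs pos with
  | case1 pos h hws =>
    refine ⟨fun m h1 h2 => by omega, ?_⟩
    right
    have hget : cs[pos]? = some cs[pos] := List.getElem?_eq_getElem h
    simp [isspaceO, hget, hws]
  | case2 pos h hws ih =>
    refine ⟨fun m h1 h2 => ?_, ih.2⟩
    by_cases hm : pos = m
    · subst hm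
      refine ⟨h, ?_⟩
      simp only [isspaceO, List.getElem?_eq_getElem h]
      simp at hws; exact hws
    · exact ih.1 m (by omega) h2
  | case3 pos h =>
    exact ⟨fun m h1 h2 => by omega, Or.inl (by omega)⟩

-- B computes the first good position
theorem scanB_eq (cs : List Char) (d pos : Nat) (hd : cs.length - pos ≤ d)
    (hinv : cs.length ≤ pos ∨ pos = 0 ∨ isspaceO cs[pos-1]? = true ∨ isspaceO cs[pos]? = true) :
    scanB cs pos = fgf cs pos := by
  induction d generalizing pos with
  | zero =>
    have hlen : cs.length ≤ pos := by omega
    rw [scanB, dif_neg (by omega), fgf_stop cs pos hlen]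
  | succ d ih =>
    by_cases hp : pos < cs.length
    · rw [scanB, dif_pos hp]
      by_cases hws : PySem.Chars.isspace cs[pos] = true
      · -- whitespace: both sides step to pos+1
        rw [if_pos hws]
        have hgood : goodB cs pos = false := by
          by_contra hc
          have hpre := goodB_prefix cs pos (by simpa using hc)
          obtain ⟨t, ht⟩ := hpre
          have h0 : (cs.drop pos)[0]? = some 's' := by rw [← ht]; rfl
          rw [List.getElem?_drop, Nat.add_zero, List.getElem?_eq_getElem hp,
            Option.some_inj] at h0
          rw [h0] at hws
          exact absurd hws (by decide)
        rw [fgf_skip cs pos hgood]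
        exact ih (pos + 1) (by omega)
          (by right; right; left; simpa [isspaceO, List.getElem?_eq_getElem hp, hws])
      · -- token starting at pos
        rw [if_neg hws]
        have hspec := skipTok_spec cs pos
        set e := skipTok cs pos with he
        have hge : pos < e := skipTok_gt cs pos hp hws
        by_cases hguard : PySem.List.slice cs (some (pos : Int)) (some (e : Int)) = shaderChars ∧ e < cs.length
        · -- token is 'shader' terminated by whitespace: good at pos
          rw [if_pos hguard]
          obtain ⟨hslice, helt⟩ := hguard
          rw [PySem.List.slice_natCast] at hslice
          have hlen6 : (e - pos) ≥ 6 ∧ e - pos ≤ cs.length - pos := by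
            have := congrArg List.length hslice
            simp [shaderChars] at this
            omega
          have he6 : e = pos + 6 := by
            have := congrArg List.length hslice
            simp [shaderChars] at this
            omega
          have hpre : shaderChars <+: cs.drop pos := hslice ▸ List.take_prefix _ _
          have hgood : goodB cs pos = true := by
            have hws6 : isspaceO cs[pos+6]? = true := by
              rcases hspec.2 with h1 | h1
              · omega
              · rwa [← he6]
            have hleft : (pos == 0 || isspaceO cs[pos-1]?) = true := by
              rcases hinv with h1 | h1 | h1 | h1
              · omega
              · simp [h1]
              · simp [h1]
              · rw [List.getElem?_eq_getElem hp] at h1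
                simp [isspaceO] at h1
                exact absurd h1 (by simpa using hws)
            simp only [goodB, Bool.and_eq_true, List.isPrefixOf_iff_prefix,
              decide_eq_true_eq]
            exact ⟨⟨⟨hpre, by simpa using hleft⟩, by omega⟩, hws6⟩
          rw [fgf_good cs pos hgood]
        · -- token is not an accepted 'shader': no good position in [pos, e)
          rw [if_neg hguard]
          have hgoodpos : goodB cs pos = false := by
            by_contra hc
            have hg : goodB cs pos = true := by simpa using hc
            have hpre := goodB_prefix cs pos hg
            have h6 : pos + 6 < cs.length := by
              simp only [goodB, Bool.and_eq_true, decide_eq_true_eq] at hg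
              exact hg.1.2
            have hws6 : isspaceO cs[pos+6]? = true := by
              simp only [goodB, Bool.and_eq_true] at hg
              exact hg.2
            obtain ⟨t, ht⟩ := hpre
            -- e = pos + 6
            have he6 : e = pos + 6 := by
              by_cases hle : e ≤ pos + 6
              · -- e < pos+6 impossible: cs[e] is a shader char, non-whitespace
                rcases Nat.eq_or_lt_of_le hle with h' | h'
                · exact h'
                · exfalso
                  have hel : e < cs.length := by omega
                  have hcse : cs[e]? = shaderChars[e - pos]? := by
                    have h1 : cs[e]? = (cs.drop pos)[e - pos]? := by
                      rw [List.getElem?_drop]; congr 1; omega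
                    rw [h1, ← ht, List.getElem?_append_left (by simp [shaderChars]; omega)]
                  have hmem : ∃ c, shaderChars[e - pos]? = some c ∧ c ∈ shaderChars := by
                    have : e - pos < shaderChars.length := by simp [shaderChars]; omega
                    exact ⟨shaderChars[e - pos], List.getElem?_eq_getElem this, List.getElem_mem _⟩
                  obtain ⟨c, hc1, hc2⟩ := hmem
                  have hnws : isspaceO cs[e]? = false := by
                    rw [hcse, hc1]
                    simp [isspaceO, shader_not_space c hc2]
                  rcases hspec.2 with h1 | h1
                  · omega
                  · rw [h1] at hnws; exact absurd hnws (by simp)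
              · exfalso
                have := (hspec.1 (pos + 6) (by omega) (by omega)).2
                rw [this] at hws6; exact absurd hws6 (by simp)
            -- then the guard would have been true
            apply hguard
            constructor
            · rw [PySem.List.slice_natCast, he6]
              have : pos + 6 - pos = 6 := by omega
              rw [this, ← ht, List.take_append_of_le_length (by simp [shaderChars])]
              rfl
            · omega
          have hmid : ∀ m, pos ≤ m → m < e → goodB cs m = false := by
            intro m h1 h2
            rcases Nat.eq_or_lt_of_le h1 with rfl | h1'
            · exact hgoodpos
            · -- m > pos: cs[m-1] is a non-ws token char
              by_contra hc
              have hg : goodB cs m = true := by simpa using hc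
              simp only [goodB, Bool.and_eq_true] at hg
              have hleft := hg.1.1.2
              have := (hspec.1 (m - 1) (by omega) (by omega)).2
              rw [this] at hleft
              simp at hleft
              omega
          rw [fgf_congr cs pos e (by omega) hmid]
          exact ih e (by omega) (by
            rcases hspec.2 with h1 | h1
            · left; exact h1
            · right; right; right; exact h1)
    · rw [scanB, dif_neg hp, fgf_stop cs pos (by omega)]

-- translate A's wrap test to goodB, given an occurrence at jn with jn+6 < len
theorem cond_eq_goodB (cs : List Char) (jn : Nat) (hpre : shaderChars <+: cs.drop jn)
    (h6 : jn + 6 < cs.length) :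
    ((decide ((jn : Int) = 0) || isspaceO (PySem.List.pyGet? cs ((jn : Int) - 1))) &&
      isspaceO (PySem.List.pyGet? cs ((jn : Int) + 6))) = goodB cs jn := by
  have hget6 : PySem.List.pyGet? cs ((jn : Int) + 6) = cs[jn + 6]? := by
    have : ((jn : Int) + 6) = ((jn + 6 : Nat) : Int) := by push_cast; ring
    rw [this, PySem.List.pyGet?_natCast]
  have hpreb : shaderChars.isPrefixOf (cs.drop jn) = true := by
    rw [List.isPrefixOf_iff_prefix]; exact hpre
  have h6b : decide (jn + 6 < cs.length) = true := by simpa using h6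
  simp only [goodB, hpreb, h6b, Bool.true_and, Bool.and_true]
  rcases Nat.eq_zero_or_pos jn with rfl | hpos
  · have e1 : PySem.List.pyGet? cs 6 = cs[6]? := by
      rw [show (6 : Int) = ((6 : Nat) : Int) by norm_cast, PySem.List.pyGet?_natCast]
    simp [e1]
  · have hj0 : ¬ ((jn : Int) = 0) := by omega
    have hget1 : PySem.List.pyGet? cs ((jn : Int) - 1) = cs[jn - 1]? := by
      have : ((jn : Int) - 1) = ((jn - 1 : Nat) : Int) := by omega
      rw [this, PySem.List.pyGet?_natCast]
    have hjn0 : (jn == 0) = false := by simp; omega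
    have hd0 : decide (jn = 0) = false := by simp; omega
    simp [hget6, hget1, hj0, hjn0, hd0]

-- an occurrence needs 6 chars of room
theorem occ_room (cs : List Char) (m : Nat) (h : shaderChars <+: cs.drop m) :
    m + 6 ≤ cs.length := by
  have := h.length_le
  simp [shaderChars] at this
  omega

-- A's loop computes the first good position ≥ k
theorem loopA_eq (cs : List Char) (fuel k : Nat) (hk : k ≤ cs.length)
    (hfuel : cs.length + 1 - k ≤ fuel)
    (hgood : ∀ m, m < k → goodB cs m = false) :
    loopA cs fuel ((k : Int) - 1) = fgf cs k := by
  induction fuel generalizing k with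
  | zero => omega
  | succ fuel ih =>
    rw [loopA]
    have hcast : ((k : Int) - 1 + 1) = (k : Int) := by ring
    rw [hcast]
    set j := PySem.Chars.findFrom cs shaderChars (k : Int) none with hj
    by_cases hneg : j = -1
    · -- no occurrence ≥ k at all: both -1
      have hno : ¬ shaderChars <:+: cs.drop k :=
        (PySem.Chars.findFrom_natCast_eq_neg_one_iff cs shaderChars k hk).mp hneg
      have hnone : ∀ m, k ≤ m → goodB cs m = false := by
        intro m hm
        by_contra hc
        exact hno (prefix_drop_infix cs shaderChars k m hm
          (goodB_prefix cs m (by simpa using hc)))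
      rw [fgf_none cs k (fun m hm => if h : m < k then hgood m h else hnone m (by omega))]
      by_cases h5 : j + 6 = (cs.length : Int)
      · rw [if_pos h5]
      · rw [if_neg h5, if_pos hneg]
    · -- an occurrence at j
      obtain ⟨hkj, hpre, hmin⟩ := PySem.Chars.findFrom_natCast_spec cs shaderChars k hk hneg
      rw [← hj] at hkj hpre hmin
      have hj0 : 0 ≤ j := le_trans (by positivity) hkj
      set jn := j.toNat with hjn
      have hjeq : j = (jn : Int) := by omega
      have hroom : jn + 6 ≤ cs.length := occ_room cs jn hpre
      have hmin' : ∀ m, k ≤ m → m < jn → goodB cs m = false := by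
        intro m h1 h2
        by_contra hc
        exact hmin m (by exact_mod_cast h1) (h2) (goodB_prefix cs m (by simpa using hc))
      by_cases hend : j + 6 = (cs.length : Int)
      · -- occurrence ends at end of string: A returns -1; no good position exists
        rw [if_pos hend]
        have hlen : jn + 6 = cs.length := by omega
        have hnone : ∀ m, k ≤ m → goodB cs m = false := by
          intro m hm
          by_contra hc
          have hg : goodB cs m = true := by simpa using hc
          rcases Nat.lt_trichotomy m jn with h' | heq | h'
          · exact absurd (hmin' m hm h') (by simp [hg])
          · simp only [goodB, Bool.and_eq_true, decide_eq_true_eq] at hg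
            omega
          · have := occ_room cs m (goodB_prefix cs m hg)
            omega
        rw [fgf_none cs k (fun m hm => if h : m < k then hgood m h else hnone m (by omega))]
      · rw [if_neg hend, if_neg hneg]
        have hlt : jn + 6 < cs.length := by omega
        have hcond := cond_eq_goodB cs jn hpre hlt
        by_cases hc : goodB cs jn = true
        · rw [if_pos (by rw [hjeq, hcond]; exact hc)]
          rw [fgf_congr cs k jn (by omega) hmin', fgf_good cs jn hc, hjeq]
        · rw [if_neg (by rw [hjeq, hcond]; simpa using hc)]
          have hrec : j = ((jn + 1 : Nat) : Int) - 1 := by omega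
          have hkjn : k ≤ jn := by omega
          rw [hrec, ih (jn + 1) (by omega) (by omega)
            (fun m hm => by
              rcases Nat.lt_trichotomy m k with h' | heq | h'
              · exact hgood m h'
              · rcases Nat.lt_or_ge m jn with h2 | h2
                · exact hmin' m (by omega) h2
                · have hmj : m = jn := by omega
                  rw [hmj]; simpa using hc
              · rcases Nat.lt_or_ge m jn with h2 | h2
                · exact hmin' m (by omega) h2
                · have hmj : m = jn := by omega
                  rw [hmj]; simpa using hc)]
          exact (fgf_congr cs k (jn + 1) (by omega)
            (fun m h1 h2 => by
              rcases Nat.lt_or_ge m jn with h2 | h2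
              · exact hmin' m h1 h2
              · have hmj : m = jn := by omega
                rw [hmj]; simpa using hc)).symm

-- ===== VERDICT (by name: the statement is the Claim_ definition above) =====
theorem findShaderKeyword_spec : Claim_equal_findShaderKeyword := by
  intro source _
  unfold Spec_findShaderKeyword findShaderKeyword findShaderKeyword_alt
  have ha : ((0 : Nat) : Int) - 1 = (-1 : Int) := by ring
  rw [← ha, loopA_eq source.toList (source.toList.length + 1) 0 (by omega) (by omega)
    (fun m hm => by omega)]
  rw [scanB_eq source.toList source.toList.length 0 (by omega) (by right; left; rfl)]
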